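-- pv_equiv track=rewrite | github.com/wherby/code | algorithm/dfs/OOM/subtree-inversion-sum/dp刷表法.py | subtreeInversionSum
-- ===== SOURCE A (Python) =====
-- from typing import List, Tuple, Optional
--
-- max = lambda a, b: b if b > a else a  # 手写 max 效率更高
--
-- def subtreeInversionSum(edges: List[List[int]], nums: List[int], k: int) -> int:
--     n = len(nums)
--     g = [[] for _ in range(n)]
--     for x, y in edges:
--         g[x].append(y)
--         g[y].append(x)
--
--     f = []
--
--     def dfs(x: int, fa: int) -> Tuple[int, int, int]:
--         f.append([0, 0])  # 用于刷表
--
--         s = nums[x]  # 子树和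
--         not_inv0 = not_inv1 = 0  # 不反转 x 时的额外增量（0 表示上面反转了偶数次，1 表示上面反转了奇数次）
--         for y in g[x]:
--             if y == fa:
--                 continue
--             sy, y0, y1 = dfs(y, x)
--             s += sy
--             # 不反转 x，反转次数的奇偶性不变
--             not_inv0 += y0
--             not_inv1 += y1
--
--         sub_res0, sub_res1 = f.pop()  # 被刷表后的结果
--
--         # 反转 x
--         # x 上面反转了偶数次，反转 x 会带来 -2 倍子树和的增量，且对于 x 的 k 级后代来说，上面反转了奇数次（所以是 sub_res1）
--         inv0 = sub_res1 - s * 2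
--         # x 上面反转了奇数次，反转 x 会带来 2 倍子树和的增量，且对于 x 的 k 级后代来说，上面反转了偶数次（所以是 sub_res0）
--         inv1 = sub_res0 + s * 2
--
--         res0 = max(not_inv0, inv0)
--         res1 = max(not_inv1, inv1)
--
--         # 刷表法：更新 x 的 k 级祖先的状态
--         if len(f) >= k:
--             f[-k][0] += res0
--             f[-k][1] += res1
--
--         return s, res0, res1
--
--     s, res0, _ = dfs(0, -1)
--     return s + res0  # 对于根节点来说，上面一定反转了偶数次（0 次）
-- ===== SOURCE B (Python) =====
-- from typing import List
--
--
-- def subtreeInversionSum(edges: List[List[int]], nums: List[int], k: int) -> int: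
--     # Pull DP with no shared mutable stack: children results are gathered as a list and
--     # the per-depth descendant (res0, res1) sums are combined column-wise.
--     n = len(nums)
--     g = [[] for _ in range(n)]
--     for x, y in edges:
--         g[x].append(y)
--         g[y].append(x)
--
--     def dfs(x, fa):
--         subs = [dfs(y, x) for y in g[x] if y != fa]
--         s = nums[x] + sum(sy for sy, _ in subs)
--         not0 = sum(d[0][0] for _, d in subs)
--         not1 = sum(d[0][1] for _, d in subs)
--         merged = []
--         for j in range(k - 1):
--             row = [d[j] for _, d in subs if j < len(d)]
--             if not row:
--                 break
--             merged.append((sum(a for a, _ in row), sum(b for _, b in row)))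
--         deep = [d[k - 1] for _, d in subs if len(d) >= k]
--         res0 = max(not0, sum(b for _, b in deep) - 2 * s)
--         res1 = max(not1, sum(a for a, _ in deep) + 2 * s)
--         return s, [(res0, res1)] + merged
--
--     s, dep = dfs(0, -1)
--     return s + dep[0][0]
-- ===== Notes on version B (the rewrite author's own statement) =====
-- stated objective: alternative
-- what changed: A threads one shared mutable ancestor stack through the DFS and each node pushes its (res0,res1) into its k-level ancestor's stack slot (push/刷表 DP); B's DFS instead returns a depth-indexed list of summed descendant (res0,res1) pairs, gathers the children's results as a list and pulls the k-level-descendant sums out of a column-wise merge, with no shared mutable state.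
-- outside the precondition, e.g. on subtreeInversionSum([[0, 1], [0, 1]], [1, 2], 1): A returns 5, B returns 5; on subtreeInversionSum([[0, -1]], [5, 7], 1): A returns 5, B returns 5; on subtreeInversionSum([[0, 0]], [3], 2): A returns 9, B returns 9
import Mathlib
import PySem

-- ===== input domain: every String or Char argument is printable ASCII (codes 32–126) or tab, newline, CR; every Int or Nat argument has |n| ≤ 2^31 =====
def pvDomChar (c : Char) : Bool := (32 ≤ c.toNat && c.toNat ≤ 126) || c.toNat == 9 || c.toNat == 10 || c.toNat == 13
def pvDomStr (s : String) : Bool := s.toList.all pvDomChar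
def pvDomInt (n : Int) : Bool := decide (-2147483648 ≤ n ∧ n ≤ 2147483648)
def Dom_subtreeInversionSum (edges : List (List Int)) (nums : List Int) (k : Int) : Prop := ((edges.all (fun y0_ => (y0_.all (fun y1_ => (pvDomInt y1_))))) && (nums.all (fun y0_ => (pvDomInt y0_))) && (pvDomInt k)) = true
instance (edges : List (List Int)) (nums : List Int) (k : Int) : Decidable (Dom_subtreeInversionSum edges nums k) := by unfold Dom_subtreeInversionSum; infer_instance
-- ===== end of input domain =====

-- B replaces A's shared ancestor-stack push DP ("刷表法") with a pull DP: adjacency in a dict,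
-- children's results collected as a list, descendant (res0, res1) sums combined column by column;
-- same value, alternative decomposition.

-- ===== PORT A =====
-- g[x].append(y) on the list-of-lists adjacency (in-range index; Pre_ excludes the rest)
def pvAdjAdd (g : List (List Int)) (i v : Int) : List (List Int) :=
  if 0 ≤ i ∧ i < (g.length : Int) then g.modify i.toNat (fun c => c ++ [v]) else g

def pvBuildAdj (n : Nat) (edges : List (List Int)) : List (List Int) :=
  edges.foldl (fun g e =>
    match e with
    | [x, y] => pvAdjAdd (pvAdjAdd g x y) y x
    | _ => g) (List.replicate n [])

def pvNbrs (g : List (List Int)) (x : Int) : List Int :=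
  (PySem.List.pyGet? g x).getD []          -- g[x]

-- f[-k][0] += res0; f[-k][1] += res1  (stack top is the list head, so f[-k] is index k-1)
def pvBump (f : List (Int × Int)) (i : Nat) (p : Int × Int) : List (Int × Int) :=
  f.modify i (fun q => (q.1 + p.1, q.2 + p.2))

-- the body of A's `for y in g[x]` loop; `rec` is the recursive dfs call at the next fuel level
def loopA (rec : Int → Int → List (Int × Int) → (Int × Int × Int) × List (Int × Int))
    (x fa : Int) : Int × Int × Int × List (Int × Int) → List Int →
    Int × Int × Int × List (Int × Int)
  | st, [] => st
  | (s, n0, n1, f), y :: ys =>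
    if y = fa then loopA rec x fa (s, n0, n1, f) ys
    else
      let r := rec y x f
      loopA rec x fa (s + r.1.1, n0 + r.1.2.1, n1 + r.1.2.2, r.2) ys

-- A's dfs; the shared list `f` is threaded through (head = top of the Python stack);
-- fuel only makes the recursion structural (inside Pre_ the graph is a forest, so fuel n+1 is never exhausted)
def dfsA (g : List (List Int)) (nums : List Int) (k : Int) :
    Nat → Int → Int → List (Int × Int) → (Int × Int × Int) × List (Int × Int)
  | 0, _, _, f => ((0, 0, 0), f)
  | fuel + 1, x, fa, f =>
    let s0 := (PySem.List.pyGet? nums x).getD 0          -- s = nums[x]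
    let st := loopA (dfsA g nums k fuel) x fa (s0, 0, 0, (0, 0) :: f) (pvNbrs g x)
    let s := st.1
    let n0 := st.2.1
    let n1 := st.2.2.1
    let f := st.2.2.2
    let sub := f.headD (0, 0)                            -- sub_res0, sub_res1 = f.pop()
    let f := f.tail
    let inv0 := sub.2 - s * 2
    let inv1 := sub.1 + s * 2
    let res0 := if inv0 > n0 then inv0 else n0           -- the module's hand-written max
    let res1 := if inv1 > n1 then inv1 else n1
    let f := if k ≤ (f.length : Int) then pvBump f (k - 1).toNat (res0, res1) else f
    ((s, res0, res1), f)

def subtreeInversionSum (edges : List (List Int)) (nums : List Int) (k : Int) : Int :=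
  let n := nums.length
  let g := pvBuildAdj n edges
  let r := dfsA g nums k (n + 1) 0 (-1) []
  r.1.1 + r.1.2.1

-- ===== PORT B =====
-- B builds the same list-of-lists adjacency as A (the Python lines are identical), then
-- runs its pull DP: no threaded stack — each call returns (subtree sum, depth list).
-- the `for j in range(k-1): … if not row: break` column loop; cnt counts the remaining range
def colLoop (subs : List (Int × List (Int × Int))) : Nat → Nat → List (Int × Int)
  | 0, _ => []
  | cnt + 1, j =>
    let row := subs.filterMap (fun p => p.2[j]?)          -- [d[j] for _, d in subs if j < len(d)]
    if row = [] then []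
    else ((row.map Prod.fst).sum, (row.map Prod.snd).sum) :: colLoop subs cnt (j + 1)

-- d[0] is ported as headD (inside Pre_ the list is never empty), `d[k-1] if len(d) >= k`
-- as the optional lookup d[(k-1).toNat]? (exact for k ≥ 1, which Pre_ guarantees)
def dfsB (g : List (List Int)) (nums : List Int) (k : Int) :
    Nat → Int → Int → Int × List (Int × Int)
  | 0, _, _ => (0, [])
  | fuel + 1, x, fa =>
    let subs := ((pvNbrs g x).filter (fun y => y ≠ fa)).map (fun y => dfsB g nums k fuel y x)
    let s := (PySem.List.pyGet? nums x).getD 0 + (subs.map Prod.fst).sum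
    let not0 := (subs.map (fun p => (p.2.headD (0, 0)).1)).sum
    let not1 := (subs.map (fun p => (p.2.headD (0, 0)).2)).sum
    let merged := colLoop subs (k - 1).toNat 0
    let deep := subs.filterMap (fun p => p.2[(k - 1).toNat]?)
    let res0 := max not0 ((deep.map Prod.snd).sum - 2 * s)
    let res1 := max not1 ((deep.map Prod.fst).sum + 2 * s)
    (s, (res0, res1) :: merged)

def subtreeInversionSum_alt (edges : List (List Int)) (nums : List Int) (k : Int) : Int :=
  let n := nums.length
  let g := pvBuildAdj n edges
  let r := dfsB g nums k (n + 1) 0 (-1)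
  r.1 + (r.2.headD (0, 0)).1

-- ===== PRECONDITION & SPEC =====
-- incremental union-find over the edge list: true iff the edges form a simple forest
-- (no self-loops, no duplicate edges, no cycles); non-pair edges are ignored here
-- (they are excluded by the pair condition of Pre_ itself)
def pvFindComp (comps : List (List Int)) (v : Int) : Option (List Int) :=
  comps.find? (fun c => c.contains v)

def pvForestAux : List (List Int) → List (List Int) → Bool
  | _, [] => true
  | comps, e :: rest =>
    match e with
    | [x, y] =>
      match pvFindComp comps x, pvFindComp comps y with
      | none, none => if x = y then false else pvForestAux ([x, y] :: comps) rest
      | some c, none => pvForestAux (comps.map fun d => if d = c then y :: d else d) rest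
      | none, some c => pvForestAux (comps.map fun d => if d = c then x :: d else d) rest
      | some c, some c' =>
        if c = c' then false
        else pvForestAux ((c ++ c') :: comps.filter fun d => !(d == c) && !(d == c')) rest
    | _ => pvForestAux comps rest

-- Pre_ = the natural domain: k ≥ 1, at least one node, every edge an in-range pair, and the
-- edges a simple forest.  It excludes inputs where Python A raises (k ≤ 0, out-of-range or
-- non-pair edges, cycles → RecursionError) and also some degenerate inputs A does return on
-- (edges with negative endpoints, where A silently wraps the index; duplicate edges and
-- self-loops, where A double-counts subtrees) — B returns the same values there, but the
-- claim restricts itself to the natural tree domain.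
def Pre_subtreeInversionSum (edges : List (List Int)) (nums : List Int) (k : Int) : Prop :=
  1 ≤ k ∧ 1 ≤ nums.length ∧
  (∀ e ∈ edges, e.length = 2 ∧ ∀ v ∈ e, 0 ≤ v ∧ v < (nums.length : Int)) ∧
  pvForestAux [] edges = true

instance (edges : List (List Int)) (nums : List Int) (k : Int) :
    Decidable (Pre_subtreeInversionSum edges nums k) := by
  unfold Pre_subtreeInversionSum; infer_instance

def pvWitness_subtreeInversionSum : List (List Int) × List Int × Int :=
  ([[0, 1], [1, 2]], [1, -2, 3], 2)

def Spec_subtreeInversionSum (edges : List (List Int)) (nums : List Int) (k : Int) (out : Int) : Prop := out = subtreeInversionSum_alt edges nums k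
instance (edges : List (List Int)) (nums : List Int) (k : Int) (out : Int) : Decidable (Spec_subtreeInversionSum edges nums k out) := by unfold Spec_subtreeInversionSum; infer_instance

-- ===== CLAIM (what is proved, stated in full; the proofs are below) =====
def Claim_equal_subtreeInversionSum : Prop := ∀ (edges : List (List Int)) (nums : List Int) (k : Int), Dom_subtreeInversionSum edges nums k → Pre_subtreeInversionSum edges nums k → Spec_subtreeInversionSum edges nums k (subtreeInversionSum edges nums k)

-- ===== LEMMAS AND PROOFS =====

-- Proof-internal bridge: a quadruple-returning pull DP dfsC (the value, both res's, and the
-- depth list) sitting between A's stack-threaded dfsA and B's pair-returning dfsB.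
def pvMergeDep : List (Int × Int) → List (Int × Int) → List (Int × Int)
  | m, [] => m
  | [], d => d
  | a :: m, b :: d => (a.1 + b.1, a.2 + b.2) :: pvMergeDep m d

def loopC (rec : Int → Int → Int × Int × Int × List (Int × Int))
    (x fa : Int) : Int × Int × Int × List (Int × Int) → List Int →
    Int × Int × Int × List (Int × Int)
  | st, [] => st
  | (s, n0, n1, merged), y :: ys =>
    if y = fa then loopC rec x fa (s, n0, n1, merged) ys
    else
      let r := rec y x
      loopC rec x fa (s + r.1, n0 + r.2.1, n1 + r.2.2.1, pvMergeDep merged r.2.2.2) ys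

def dfsC (g : List (List Int)) (nums : List Int) (k : Int) :
    Nat → Int → Int → Int × Int × Int × List (Int × Int)
  | 0, _, _ => (0, 0, 0, [])
  | fuel + 1, x, fa =>
    let s0 := (PySem.List.pyGet? nums x).getD 0
    let st := loopC (dfsC g nums k fuel) x fa (s0, 0, 0, []) (pvNbrs g x)
    let s := st.1
    let n0 := st.2.1
    let n1 := st.2.2.1
    let merged := st.2.2.2
    let sub := if k ≤ (merged.length : Int) then merged.getD (k - 1).toNat (0, 0) else (0, 0)
    let inv0 := sub.2 - 2 * s
    let inv1 := sub.1 + 2 * s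
    let res0 := max n0 inv0
    let res1 := max n1 inv1
    (s, res0, res1, (res0, res1) :: merged.take (k - 1).toNat)

-- ---- part I : dfsA = repackaged dfsC ----

def pvApplyDep (f : List (Int × Int)) : List (Int × Int) → Nat → List (Int × Int)
  | [], _ => f
  | p :: rest, i => pvApplyDep (pvBump f i p) rest (i - 1)

lemma length_bump (f : List (Int × Int)) (i : Nat) (p : Int × Int) :
    (pvBump f i p).length = f.length := by
  simp [pvBump]

lemma length_applyDep (d : List (Int × Int)) :
    ∀ (f : List (Int × Int)) (i : Nat), (pvApplyDep f d i).length = f.length := by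
  induction d with
  | nil => intro f i; rfl
  | cons p rest ih => intro f i; simp [pvApplyDep, ih, length_bump]

lemma bump_oob (f : List (Int × Int)) (i : Nat) (p : Int × Int) (h : f.length ≤ i) :
    pvBump f i p = f := by
  simp [pvBump, List.modify_eq_self, h]

lemma bump_comm (f : List (Int × Int)) (i j : Nat) (p q : Int × Int) (h : i ≠ j) :
    pvBump (pvBump f i p) j q = pvBump (pvBump f j q) i p := by
  simp only [pvBump]
  rw [List.modify_modify_ne _ _ _ h.symm]

lemma bump_bump_same (f : List (Int × Int)) (i : Nat) (p q : Int × Int) :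
    pvBump (pvBump f i p) i q = pvBump f i (p.1 + q.1, p.2 + q.2) := by
  simp only [pvBump]
  rw [List.modify_modify_eq]
  congr 1
  funext r
  simp [Function.comp]
  constructor <;> ring

lemma bump_applyDep (d : List (Int × Int)) :
    ∀ (f : List (Int × Int)) (i j : Nat) (q : Int × Int), j < i →
      pvBump (pvApplyDep f d j) i q = pvApplyDep (pvBump f i q) d j := by
  induction d with
  | nil => intro f i j q h; rfl
  | cons p rest ih =>
    intro f i j q h
    simp only [pvApplyDep]
    rw [ih _ _ _ _ (by omega), bump_comm _ _ _ _ _ (by omega)]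

lemma applyDep_merge (d1 : List (Int × Int)) :
    ∀ (d2 : List (Int × Int)) (f : List (Int × Int)) (i : Nat),
      d1.length ≤ i + 1 → d2.length ≤ i + 1 →
      pvApplyDep f (pvMergeDep d1 d2) i = pvApplyDep (pvApplyDep f d1 i) d2 i := by
  induction d1 with
  | nil =>
    intro d2 f i h1 h2
    cases d2 <;> rfl
  | cons a m1 ih =>
    intro d2 f i h1 h2
    match d2, i with
    | [], _ => rfl
    | b :: m2, 0 =>
      have hm1 : m1 = [] := by simpa using h1
      have hm2 : m2 = [] := by simpa using h2
      subst hm1; subst hm2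
      simp only [pvMergeDep, pvApplyDep, bump_bump_same]
    | b :: m2, i + 1 =>
      simp only [pvMergeDep, pvApplyDep, Nat.add_sub_cancel]
      rw [ih m2 _ i (by simpa using h1) (by simpa using h2)]
      congr 1
      rw [bump_applyDep _ _ _ _ _ (by omega), bump_bump_same]

lemma applyDep_cons (d : List (Int × Int)) :
    ∀ (z : Int × Int) (f : List (Int × Int)) (i : Nat), d.length ≤ i + 1 →
      pvApplyDep (z :: f) d i =
        (z.1 + (d.getD i (0, 0)).1, z.2 + (d.getD i (0, 0)).2) ::
          pvApplyDep f (d.take i) (i - 1) := by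
  induction d with
  | nil =>
    intro z f i h
    simp [pvApplyDep]
  | cons p rest ih =>
    intro z f i h
    match i with
    | 0 =>
      have : rest = [] := by simpa using h
      subst this
      simp [pvApplyDep, pvBump, List.modify_zero_cons]
    | i + 1 =>
      simp only [pvApplyDep, pvBump, List.modify_succ_cons, List.take_succ_cons,
        List.getD_cons_succ, Nat.add_sub_cancel]
      rw [ih z (f.modify i fun q => (q.1 + p.1, q.2 + p.2)) i (by simpa using h)]

lemma length_mergeDep (d1 : List (Int × Int)) :
    ∀ d2 : List (Int × Int), (pvMergeDep d1 d2).length = max d1.length d2.length := by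
  induction d1 with
  | nil => intro d2; cases d2 <;> simp [pvMergeDep]
  | cons a m1 ih =>
    intro d2
    cases d2 with
    | nil => simp [pvMergeDep]
    | cons b m2 => simp [pvMergeDep, ih m2]

lemma dep_le (g : List (List Int)) (nums : List Int) (k : Int) (hk : 1 ≤ k)
    (fuel : Nat) (x fa : Int) :
    (dfsC g nums k fuel x fa).2.2.2.length ≤ k.toNat := by
  cases fuel with
  | zero => simp [dfsC]
  | succ fuel => simp [dfsC]; omega

lemma loopC_len (g : List (List Int)) (nums : List Int) (k : Int) (hk : 1 ≤ k)
    (fuel : Nat) (x fa : Int) (ys : List Int) :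
    ∀ (s n0 n1 : Int) (merged : List (Int × Int)), merged.length ≤ k.toNat →
      (loopC (dfsC g nums k fuel) x fa (s, n0, n1, merged) ys).2.2.2.length ≤ k.toNat := by
  induction ys with
  | nil => intro s n0 n1 merged hm; simpa [loopC] using hm
  | cons y ys ihy =>
    intro s n0 n1 merged hm
    by_cases hy : y = fa
    · simp only [loopC, if_pos hy]; exact ihy _ _ _ _ hm
    · simp only [loopC, if_neg hy]
      exact ihy _ _ _ _ (by
        rw [length_mergeDep]
        exact max_le hm (dep_le g nums k hk fuel y x))

lemma final_stack (f t : List (Int × Int)) (k : Int) (hk : 1 ≤ k) (res : Int × Int)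
    (ht : t.length ≤ k.toNat - 1) :
    (if k ≤ ((pvApplyDep f t (k.toNat - 1 - 1)).length : Int)
        then pvBump (pvApplyDep f t (k.toNat - 1 - 1)) (k.toNat - 1) res
        else pvApplyDep f t (k.toNat - 1 - 1)) =
      pvApplyDep f (res :: t) (k.toNat - 1) := by
  have hrhs : pvApplyDep f (res :: t) (k.toNat - 1)
      = pvApplyDep (pvBump f (k.toNat - 1) res) t (k.toNat - 1 - 1) := rfl
  rw [hrhs, length_applyDep]
  by_cases hc : k ≤ (f.length : Int)
  · rw [if_pos hc]
    rcases Nat.lt_or_ge 1 k.toNat with h2 | h2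
    · exact bump_applyDep t f (k.toNat - 1) (k.toNat - 1 - 1) res (by omega)
    · cases t with
      | nil => rfl
      | cons a tt => simp at ht; omega
  · rw [if_neg hc, bump_oob f (k.toNat - 1) res (by omega)]

lemma dfs_equiv (g : List (List Int)) (nums : List Int) (k : Int) (hk : 1 ≤ k) :
    ∀ (fuel : Nat) (x fa : Int) (f : List (Int × Int)),
      dfsA g nums k fuel x fa f =
        (((dfsC g nums k fuel x fa).1, (dfsC g nums k fuel x fa).2.1,
           (dfsC g nums k fuel x fa).2.2.1),
          pvApplyDep f (dfsC g nums k fuel x fa).2.2.2 (k.toNat - 1)) := by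
  intro fuel
  induction fuel with
  | zero => intro x fa f; rfl
  | succ fuel ih =>
    have hloop : ∀ (ys : List Int) (x fa s n0 n1 : Int) (F merged : List (Int × Int)),
        merged.length ≤ k.toNat →
        loopA (dfsA g nums k fuel) x fa (s, n0, n1, pvApplyDep F merged (k.toNat - 1)) ys =
          ((loopC (dfsC g nums k fuel) x fa (s, n0, n1, merged) ys).1,
           (loopC (dfsC g nums k fuel) x fa (s, n0, n1, merged) ys).2.1,
           (loopC (dfsC g nums k fuel) x fa (s, n0, n1, merged) ys).2.2.1,
           pvApplyDep F (loopC (dfsC g nums k fuel) x fa (s, n0, n1, merged) ys).2.2.2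
             (k.toNat - 1)) := by
      intro ys
      induction ys with
      | nil => intro x fa s n0 n1 F merged hm; simp [loopA, loopC]
      | cons y ys ihy =>
        intro x fa s n0 n1 F merged hm
        by_cases hy : y = fa
        · simp only [loopA, loopC, if_pos hy]; exact ihy _ _ _ _ _ _ _ hm
        · simp only [loopA, loopC, if_neg hy]
          rw [ih y x]
          dsimp only
          rw [← applyDep_merge merged (dfsC g nums k fuel y x).2.2.2 F (k.toNat - 1)
            (by omega) (by have := dep_le g nums k hk fuel y x; omega)]
          exact ihy _ _ _ _ _ _ _ (by
            rw [length_mergeDep]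
            exact max_le hm (dep_le g nums k hk fuel y x))
    intro x fa f
    simp only [dfsA, dfsC]
    rw [show ((0, 0) : Int × Int) :: f = pvApplyDep ((0, 0) :: f) [] (k.toNat - 1) from rfl,
      hloop _ _ _ _ _ _ _ _ (by simp)]
    have hlen : (loopC (dfsC g nums k fuel) x fa ((PySem.List.pyGet? nums x).getD 0, 0, 0, [])
        (pvNbrs g x)).2.2.2.length ≤ k.toNat :=
      loopC_len g nums k hk fuel x fa (pvNbrs g x) _ _ _ [] (by simp)
    generalize loopC (dfsC g nums k fuel) x fa ((PySem.List.pyGet? nums x).getD 0, 0, 0, [])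
        (pvNbrs g x) = r at hlen ⊢
    obtain ⟨s, n0, n1, d⟩ := r
    dsimp only at hlen ⊢
    have hkt : (k - 1).toNat = k.toNat - 1 := by omega
    simp only [hkt]
    rw [applyDep_cons d (0, 0) f (k.toNat - 1) (by omega)]
    simp only [List.headD_cons, List.tail_cons, zero_add]
    have hsub : (if k ≤ (d.length : Int) then d.getD (k.toNat - 1) (0, 0) else (0, 0))
        = d.getD (k.toNat - 1) (0, 0) := by
      split_ifs with h
      · rfl
      · exact (List.getD_eq_default _ _ (by omega)).symm
    rw [hsub]
    simp only [show ∀ s : Int, s * 2 = 2 * s from fun s => by ring]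
    have hmax : ∀ a b : Int, (if b > a then b else a) = max a b := by
      intro a b; rw [max_def]; split_ifs <;> omega
    rw [hmax, hmax]
    rw [final_stack f (d.take (k.toNat - 1)) k hk _ (by simp)]

-- ---- part II : dfsB = projection of dfsC ----

lemma headD_dfsC (g : List (List Int)) (nums : List Int) (k : Int) (fuel : Nat) (x fa : Int) :
    (dfsC g nums k fuel x fa).2.2.2.headD (0, 0) =
      ((dfsC g nums k fuel x fa).2.1, (dfsC g nums k fuel x fa).2.2.1) := by
  cases fuel <;> simp [dfsC]

-- column lookup in a pointwise merge
lemma mergeDep_get? (a : List (Int × Int)) :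
    ∀ (b : List (Int × Int)) (j : Nat),
      (pvMergeDep a b)[j]? =
        match a[j]?, b[j]? with
        | none, none => none
        | some p, none => some p
        | none, some q => some q
        | some p, some q => some (p.1 + q.1, p.2 + q.2) := by
  induction a with
  | nil =>
    intro b j
    cases b with
    | nil => simp [pvMergeDep]
    | cons q d => cases h : (q :: d)[j]? <;> simp [pvMergeDep, h]
  | cons p m ih =>
    intro b j
    cases b with
    | nil => cases h : (p :: m)[j]? <;> simp [pvMergeDep, h]
    | cons q d =>
      cases j with
      | zero => simp [pvMergeDep]
      | succ j => simpa [pvMergeDep] using ih d j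

def pvColl (o : Option (Int × Int)) (ds : List (List (Int × Int))) (j : Nat) :
    Option (Int × Int) :=
  ds.foldl (fun acc d =>
    match acc, d[j]? with
    | none, none => none
    | some p, none => some p
    | none, some q => some q
    | some p, some q => some (p.1 + q.1, p.2 + q.2)) o

lemma pvColl_cons (o : Option (Int × Int)) (d : List (Int × Int))
    (ds : List (List (Int × Int))) (j : Nat) :
    pvColl o (d :: ds) j =
      pvColl (match o, d[j]? with
        | none, none => none
        | some p, none => some p
        | none, some q => some q
        | some p, some q => some (p.1 + q.1, p.2 + q.2)) ds j := rfl

lemma foldl_merge_get? (ds : List (List (Int × Int))) :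
    ∀ (m : List (Int × Int)) (j : Nat),
      (ds.foldl pvMergeDep m)[j]? = pvColl (m[j]?) ds j := by
  induction ds with
  | nil => intro m j; rfl
  | cons d ds ih =>
    intro m j
    simp only [List.foldl_cons]
    rw [ih (pvMergeDep m d) j, mergeDep_get?, pvColl_cons]

lemma pvColl_some (ds : List (List (Int × Int))) :
    ∀ (p : Int × Int) (j : Nat),
      pvColl (some p) ds j =
        some (p.1 + ((ds.filterMap (fun d => d[j]?)).map Prod.fst).sum,
              p.2 + ((ds.filterMap (fun d => d[j]?)).map Prod.snd).sum) := by
  induction ds with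
  | nil => intro p j; simp [pvColl]
  | cons d ds ih =>
    intro p j
    rw [pvColl_cons]
    cases h : d[j]? with
    | none => simp [h, ih]
    | some q => simp [h, ih, add_assoc]

lemma pvColl_none (ds : List (List (Int × Int))) (j : Nat) :
    pvColl none ds j =
      if ds.filterMap (fun d => d[j]?) = [] then none
      else some (((ds.filterMap (fun d => d[j]?)).map Prod.fst).sum,
                 ((ds.filterMap (fun d => d[j]?)).map Prod.snd).sum) := by
  induction ds with
  | nil => simp [pvColl]
  | cons d ds ih =>
    rw [pvColl_cons]
    cases h : d[j]? with
    | none => simpa [h] using ih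
    | some q => simp [h, pvColl_some]

-- the column loop of B is the truncated pointwise merge of dfsC
lemma colLoop_eq (subs : List (Int × List (Int × Int))) :
    ∀ (cnt j : Nat),
      colLoop subs cnt j =
        (((subs.map Prod.snd).foldl pvMergeDep []).drop j).take cnt := by
  intro cnt
  induction cnt with
  | zero => intro j; rfl
  | succ cnt ih =>
    intro j
    have hcol : subs.filterMap (fun p => p.2[j]?)
        = (subs.map Prod.snd).filterMap (fun d => d[j]?) := by
      rw [List.filterMap_map]; rfl
    have hget : ((subs.map Prod.snd).foldl pvMergeDep [])[j]?
        = pvColl none (subs.map Prod.snd) j :=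
      foldl_merge_get? (subs.map Prod.snd) [] j
    simp only [colLoop, hcol]
    by_cases hrow : (subs.map Prod.snd).filterMap (fun d => d[j]?) = []
    · rw [if_pos hrow]
      have : ((subs.map Prod.snd).foldl pvMergeDep [])[j]? = none := by
        rw [hget, pvColl_none, if_pos hrow]
      rw [List.drop_eq_nil_of_le (by simpa [List.getElem?_eq_none_iff] using this)]
      simp
    · rw [if_neg hrow]
      have hsome : ((subs.map Prod.snd).foldl pvMergeDep [])[j]?
          = some (((subs.map Prod.snd).filterMap (fun d => d[j]?)).map Prod.fst |>.sum,
                  ((subs.map Prod.snd).filterMap (fun d => d[j]?)).map Prod.snd |>.sum) := by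
        rw [hget, pvColl_none, if_neg hrow]
      have hj : j < ((subs.map Prod.snd).foldl pvMergeDep []).length := by
        by_contra hc
        rw [List.getElem?_eq_none_iff.2 (by omega)] at hsome
        exact absurd hsome (by simp)
      rw [List.drop_eq_getElem_cons hj, List.take_succ_cons, ih (j + 1)]
      have := hsome
      rw [List.getElem?_eq_getElem hj] at this
      simp only [Option.some.injEq] at this
      rw [this]

-- the deep-level pair of B equals dfsC's guarded lookup
lemma deep_eq (subs : List (Int × List (Int × Int))) (k : Int) (hk : 1 ≤ k) :
    (if k ≤ (((subs.map Prod.snd).foldl pvMergeDep []).length : Int)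
        then ((subs.map Prod.snd).foldl pvMergeDep []).getD (k - 1).toNat (0, 0) else (0, 0))
      = (((subs.filterMap (fun p => p.2[(k - 1).toNat]?)).map Prod.fst).sum,
         ((subs.filterMap (fun p => p.2[(k - 1).toNat]?)).map Prod.snd).sum) := by
  have hcol : subs.filterMap (fun p => p.2[(k - 1).toNat]?)
      = (subs.map Prod.snd).filterMap (fun d => d[(k - 1).toNat]?) := by
    rw [List.filterMap_map]; rfl
  have hget : ((subs.map Prod.snd).foldl pvMergeDep [])[(k - 1).toNat]?
      = if (subs.map Prod.snd).filterMap (fun d => d[(k - 1).toNat]?) = [] then none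
        else some ((((subs.map Prod.snd).filterMap (fun d => d[(k - 1).toNat]?)).map Prod.fst).sum,
                   (((subs.map Prod.snd).filterMap (fun d => d[(k - 1).toNat]?)).map Prod.snd).sum) := by
    have h := foldl_merge_get? (subs.map Prod.snd) [] (k - 1).toNat
    rw [show (([] : List (Int × Int))[(k - 1).toNat]?) = none from rfl, pvColl_none] at h
    exact h
  by_cases hrow : (subs.map Prod.snd).filterMap (fun d => d[(k - 1).toNat]?) = []
  · have hnone : ((subs.map Prod.snd).foldl pvMergeDep [])[(k - 1).toNat]? = none := by
      rw [hget, if_pos hrow]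
    have hlen : ((subs.map Prod.snd).foldl pvMergeDep []).length ≤ (k - 1).toNat := by
      simpa [List.getElem?_eq_none_iff] using hnone
    rw [if_neg (by omega), hcol, hrow]
    simp
  · have hsome : ((subs.map Prod.snd).foldl pvMergeDep [])[(k - 1).toNat]?
        = some ((((subs.map Prod.snd).filterMap (fun d => d[(k - 1).toNat]?)).map Prod.fst).sum,
                (((subs.map Prod.snd).filterMap (fun d => d[(k - 1).toNat]?)).map Prod.snd).sum) := by
      rw [hget, if_neg hrow]
    have hlt : (k - 1).toNat < ((subs.map Prod.snd).foldl pvMergeDep []).length := by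
      by_contra hc
      rw [List.getElem?_eq_none_iff.2 (by omega)] at hsome
      exact absurd hsome (by simp)
    rw [if_pos (by omega), List.getD_eq_getElem?_getD, hsome, hcol]
    rfl

-- the fold of loopC, in closed form over the filtered neighbour list
lemma loopC_spec (rec : Int → Int → Int × Int × Int × List (Int × Int)) (x fa : Int)
    (ys : List Int) :
    ∀ (s n0 n1 : Int) (m : List (Int × Int)),
      loopC rec x fa (s, n0, n1, m) ys =
        (s + ((ys.filter (fun y => y ≠ fa)).map (fun y => (rec y x).1)).sum,
         n0 + ((ys.filter (fun y => y ≠ fa)).map (fun y => (rec y x).2.1)).sum,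
         n1 + ((ys.filter (fun y => y ≠ fa)).map (fun y => (rec y x).2.2.1)).sum,
         (ys.filter (fun y => y ≠ fa)).foldl (fun m y => pvMergeDep m (rec y x).2.2.2) m) := by
  induction ys with
  | nil => intro s n0 n1 m; simp [loopC]
  | cons y ys ih =>
    intro s n0 n1 m
    by_cases hy : y = fa
    · simp only [loopC, List.filter_cons, hy]
      simpa using ih s n0 n1 m
    · simp only [loopC, if_neg hy, List.filter_cons]
      rw [if_pos (by simpa using hy)]
      simp [ih, add_assoc]

lemma dfsB_eq_dfsC (g : List (List Int)) (nums : List Int) (k : Int) (hk : 1 ≤ k) :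
    ∀ (fuel : Nat) (x fa : Int),
      dfsB g nums k fuel x fa =
        ((dfsC g nums k fuel x fa).1, (dfsC g nums k fuel x fa).2.2.2) := by
  intro fuel
  induction fuel with
  | zero => intro x fa; rfl
  | succ fuel ih =>
    intro x fa
    have hsubs : ((pvNbrs g x).filter (fun y => y ≠ fa)).map
          (fun y => dfsB g nums k fuel y x)
        = ((pvNbrs g x).filter (fun y => y ≠ fa)).map
          (fun y => ((dfsC g nums k fuel y x).1, (dfsC g nums k fuel y x).2.2.2)) := by
      exact List.map_congr_left fun y _ => ih y x
    simp only [dfsB, dfsC, hsubs, loopC_spec]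
    set fl := (pvNbrs g x).filter (fun y => y ≠ fa) with hfl
    set π := fun y => ((dfsC g nums k fuel y x).1, (dfsC g nums k fuel y x).2.2.2) with hπ
    have h1 : ((fl.map π).map Prod.fst).sum
        = (fl.map (fun y => (dfsC g nums k fuel y x).1)).sum := by
      simp [List.map_map, hπ, Function.comp_def]
    have h2 : ((fl.map π).map (fun p => (p.2.headD (0, 0)).1)).sum
        = (fl.map (fun y => (dfsC g nums k fuel y x).2.1)).sum := by
      simp only [List.map_map, Function.comp_def, hπ, headD_dfsC]
    have h3 : ((fl.map π).map (fun p => (p.2.headD (0, 0)).2)).sum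
        = (fl.map (fun y => (dfsC g nums k fuel y x).2.2.1)).sum := by
      simp only [List.map_map, Function.comp_def, hπ, headD_dfsC]
    have hmg : ((fl.map π).map Prod.snd).foldl pvMergeDep []
        = fl.foldl (fun m y => pvMergeDep m (dfsC g nums k fuel y x).2.2.2) [] := by
      simp [List.map_map, hπ, Function.comp_def, List.foldl_map]
    rw [colLoop_eq]
    simp only [List.drop_zero]
    rw [← hmg, deep_eq (List.map π fl) k hk, h1, h2, h3]
    simp

-- ===== VERDICT (by name: the statement is the Claim_ definition above) =====
theorem subtreeInversionSum_spec : Claim_equal_subtreeInversionSum := by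
  intro edges nums k _ hpre
  unfold Spec_subtreeInversionSum
  obtain ⟨hk, -, -, -⟩ := hpre
  simp only [subtreeInversionSum, subtreeInversionSum_alt,
    dfs_equiv (pvBuildAdj nums.length edges) nums k hk,
    dfsB_eq_dfsC (pvBuildAdj nums.length edges) nums k hk]
  rw [headD_dfsC]
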